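-- pv_equiv track=rewrite | github.com/adbertram/Podio-CLI | podio_cli/commands/app.py | _apply_client_filter
-- ===== SOURCE A (Python) =====
-- def _apply_client_filter(data: list, filters: list) -> list:
--     """Apply client-side filtering using field:op:value syntax."""
--     if not filters or not isinstance(data, list):
--         return data
--
--     result = data
--     for f in filters:
--         parts = f.split(":", 2)
--         if len(parts) < 2:
--             continue
--
--         field = parts[0]
--         if len(parts) == 2:
--             # field:value format (exact match)
--             op, value = "eq", parts[1]
--         else:
--             # field:op:value format
--             op, value = parts[1], parts[2]
--
--         filtered = []
--         for item in result:
--             item_value = item.get(field)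
--             if item_value is None:
--                 continue
--
--             # Convert to string for comparison
--             item_str = str(item_value).lower()
--             value_str = value.lower()
--
--             if op == "eq" and item_str == value_str:
--                 filtered.append(item)
--             elif op == "ne" and item_str != value_str:
--                 filtered.append(item)
--             elif op == "contains" and value_str in item_str:
--                 filtered.append(item)
--             elif op == "gt" and item_str > value_str:
--                 filtered.append(item)
--             elif op == "lt" and item_str < value_str:
--                 filtered.append(item)
--
--         result = filtered
--
--     return result
-- ===== SOURCE B (Python) =====
-- def _apply_client_filter(data: list, filters: list) -> list:
--     """Apply client-side filtering: parse filters once into (field, op, value)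
--     predicates, then keep items in a single pass that satisfy all of them."""
--     if not filters or not isinstance(data, list):
--         return data
--
--     def parse(f):
--         parts = f.split(":", 2)
--         if len(parts) < 2:
--             return None
--         if len(parts) == 2:
--             return parts[0], "eq", parts[1].lower()
--         return parts[0], parts[1], parts[2].lower()
--
--     preds = [t for t in map(parse, filters) if t is not None]
--
--     def matches(item, field, op, value):
--         item_value = item.get(field)
--         if item_value is None:
--             return False
--         s = str(item_value).lower()
--         if op == "eq":
--             return s == value
--         if op == "ne":
--             return s != value
--         if op == "contains":
--             return value in s
--         if op == "gt":
--             return s > value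
--         if op == "lt":
--             return s < value
--         return False
--
--     return [item for item in data if all(matches(item, *t) for t in preds)]
-- ===== Notes on version B (the rewrite author's own statement) =====
-- stated objective: alternative
-- what changed: B parses all filters once into (field, op, value) predicates and makes a single pass over data keeping items that satisfy all of them, instead of A's re-filtering of the whole list once per filter.
import Mathlib
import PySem

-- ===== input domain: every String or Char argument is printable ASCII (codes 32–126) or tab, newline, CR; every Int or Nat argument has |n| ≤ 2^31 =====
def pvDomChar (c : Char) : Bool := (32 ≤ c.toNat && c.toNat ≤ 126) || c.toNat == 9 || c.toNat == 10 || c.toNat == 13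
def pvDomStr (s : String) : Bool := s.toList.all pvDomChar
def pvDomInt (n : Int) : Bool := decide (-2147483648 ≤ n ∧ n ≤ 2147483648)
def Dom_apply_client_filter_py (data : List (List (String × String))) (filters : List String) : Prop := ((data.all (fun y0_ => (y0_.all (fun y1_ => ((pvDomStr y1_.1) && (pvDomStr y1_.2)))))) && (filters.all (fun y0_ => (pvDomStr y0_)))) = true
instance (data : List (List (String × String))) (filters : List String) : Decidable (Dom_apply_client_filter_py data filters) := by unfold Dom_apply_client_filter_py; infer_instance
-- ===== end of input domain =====

-- B parses every filter once into (field, op, value) predicates and keeps items in a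
-- single pass over data with all(...); same values as A's sequential re-filtering.

-- ===== PORT A =====
-- one pass of A's outer loop body: filter `result` by one `f`
def pvStepA (result : List (List (String × String))) (f : String) : List (List (String × String)) :=
  match PySem.Str.splitMax? f ":" 2 with
  | none => result
  | some parts =>
    if parts.length < 2 then result
    else
      let field := parts.getD 0 ""
      let ov : String × String :=
        if parts.length = 2 then ("eq", parts.getD 1 "")
        else (parts.getD 1 "", parts.getD 2 "")
      let op := ov.1
      let value := ov.2
      result.foldl (fun filtered item =>
        match PySem.Dict.get? (PySem.Dict.mk item) field with
        | none => filtered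
        | some iv =>
          let item_str := PySem.Str.lower iv
          let value_str := PySem.Str.lower value
          if op == "eq" && item_str == value_str then filtered ++ [item]
          else if op == "ne" && item_str != value_str then filtered ++ [item]
          else if op == "contains" && PySem.Str.isIn value_str item_str then filtered ++ [item]
          else if op == "gt" && decide (value_str < item_str) then filtered ++ [item]
          else if op == "lt" && decide (item_str < value_str) then filtered ++ [item]
          else filtered) []

def apply_client_filter_py (data : List (List (String × String))) (filters : List String) : List (List (String × String)) :=
  if filters.isEmpty then data
  else filters.foldl pvStepA data

-- ===== PORT B =====
def pvParse (f : String) : Option (String × String × String) :=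
  match PySem.Str.splitMax? f ":" 2 with
  | none => none
  | some parts =>
    if parts.length < 2 then none
    else if parts.length = 2 then some (parts.getD 0 "", "eq", PySem.Str.lower (parts.getD 1 ""))
    else some (parts.getD 0 "", parts.getD 1 "", PySem.Str.lower (parts.getD 2 ""))

def pvMatches (item : List (String × String)) (t : String × String × String) : Bool :=
  match PySem.Dict.get? (PySem.Dict.mk item) t.1 with
  | none => false
  | some iv =>
    let s := PySem.Str.lower iv
    if t.2.1 == "eq" then s == t.2.2
    else if t.2.1 == "ne" then s != t.2.2
    else if t.2.1 == "contains" then PySem.Str.isIn t.2.2 s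
    else if t.2.1 == "gt" then decide (t.2.2 < s)
    else if t.2.1 == "lt" then decide (s < t.2.2)
    else false

def apply_client_filter_py_alt (data : List (List (String × String))) (filters : List String) : List (List (String × String)) :=
  if filters.isEmpty then data
  else
    let preds := filters.filterMap pvParse
    data.filter (fun item => preds.all (pvMatches item))

-- ===== PRECONDITION & SPEC =====
def Spec_apply_client_filter_py (data : List (List (String × String))) (filters : List String) (out : List (List (String × String))) : Prop := out = apply_client_filter_py_alt data filters
instance (data : List (List (String × String))) (filters : List String) (out : List (List (String × String))) : Decidable (Spec_apply_client_filter_py data filters out) := by unfold Spec_apply_client_filter_py; infer_instance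

-- ===== CLAIM (what is proved, stated in full; the proofs are below) =====
def Claim_equal_apply_client_filter_py : Prop := ∀ (data : List (List (String × String))) (filters : List String), Dom_apply_client_filter_py data filters → Spec_apply_client_filter_py data filters (apply_client_filter_py data filters)

-- ===== LEMMAS AND PROOFS =====

-- A's inner-loop body appends `item` exactly when `pvMatches item (field, op, lower value)`
theorem pvStepA_body_eq (field op value : String) (acc : List (List (String × String))) (item : List (String × String)) :
    (match PySem.Dict.get? (PySem.Dict.mk item) field with
      | none => acc
      | some iv =>
        let item_str := PySem.Str.lower iv
        let value_str := PySem.Str.lower value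
        if op == "eq" && item_str == value_str then acc ++ [item]
        else if op == "ne" && item_str != value_str then acc ++ [item]
        else if op == "contains" && PySem.Str.isIn value_str item_str then acc ++ [item]
        else if op == "gt" && decide (value_str < item_str) then acc ++ [item]
        else if op == "lt" && decide (item_str < value_str) then acc ++ [item]
        else acc)
    = if pvMatches item (field, op, PySem.Str.lower value) then acc ++ [item] else acc := by
  unfold pvMatches
  cases hg : PySem.Dict.get? (PySem.Dict.mk item) field with
  | none => simp
  | some iv =>
    simp only []
    by_cases h1 : op == "eq" <;> by_cases h2 : op == "ne" <;>
      by_cases h3 : op == "contains" <;> by_cases h4 : op == "gt" <;>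
      by_cases h5 : op == "lt" <;>
      simp [h1, h2, h3, h4, h5] <;> split_ifs <;> simp_all

-- A's inner fold over `result` is a filter by the parsed predicate
theorem pvInnerFoldA (field op value : String) (result : List (List (String × String))) :
    result.foldl (fun filtered item =>
        match PySem.Dict.get? (PySem.Dict.mk item) field with
        | none => filtered
        | some iv =>
          let item_str := PySem.Str.lower iv
          let value_str := PySem.Str.lower value
          if op == "eq" && item_str == value_str then filtered ++ [item]
          else if op == "ne" && item_str != value_str then filtered ++ [item]
          else if op == "contains" && PySem.Str.isIn value_str item_str then filtered ++ [item]
          else if op == "gt" && decide (value_str < item_str) then filtered ++ [item]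
          else if op == "lt" && decide (item_str < value_str) then filtered ++ [item]
          else filtered) []
      = result.filter (fun item => pvMatches item (field, op, PySem.Str.lower value)) := by
  rw [show (fun (filtered : List (List (String × String))) (item : List (String × String)) =>
        match PySem.Dict.get? (PySem.Dict.mk item) field with
        | none => filtered
        | some iv =>
          let item_str := PySem.Str.lower iv
          let value_str := PySem.Str.lower value
          if op == "eq" && item_str == value_str then filtered ++ [item]
          else if op == "ne" && item_str != value_str then filtered ++ [item]
          else if op == "contains" && PySem.Str.isIn value_str item_str then filtered ++ [item]
          else if op == "gt" && decide (value_str < item_str) then filtered ++ [item]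
          else if op == "lt" && decide (item_str < value_str) then filtered ++ [item]
          else filtered)
      = fun acc item => if pvMatches item (field, op, PySem.Str.lower value) then acc ++ [item] else acc
    from funext fun acc => funext fun item => pvStepA_body_eq field op value acc item]
  simpa using PySem.List.foldl_append_if (fun item => pvMatches item (field, op, PySem.Str.lower value)) id result []

-- one pass of A's outer loop = filtering by the parsed predicate (or identity if malformed)
theorem pvStepA_eq_filter (result : List (List (String × String))) (f : String) :
    pvStepA result f =
      match pvParse f with
      | none => result
      | some t => result.filter (fun item => pvMatches item t) := by
  unfold pvStepA pvParse
  cases hs : PySem.Str.splitMax? f ":" 2 with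
  | none => rfl
  | some parts =>
    by_cases hlt : parts.length < 2
    · simp only [if_pos hlt]
    · simp only [if_neg hlt]
      by_cases h2 : parts.length = 2
      · simp only [if_pos h2]
        exact pvInnerFoldA (parts.getD 0 "") "eq" (parts.getD 1 "") result
      · simp only [if_neg h2]
        exact pvInnerFoldA (parts.getD 0 "") (parts.getD 1 "") (parts.getD 2 "") result

-- A's whole fold = B's single filter
theorem pvFold_eq_filter (filters : List String) (data : List (List (String × String))) :
    filters.foldl pvStepA data
      = data.filter (fun item => (filters.filterMap pvParse).all (pvMatches item)) := by
  induction filters generalizing data with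
  | nil => simp
  | cons f fs ih =>
    rw [List.foldl_cons, ih, pvStepA_eq_filter]
    cases hp : pvParse f with
    | none => simp [hp]
    | some t =>
      simp only [List.filterMap_cons, hp, List.filter_filter, List.all_cons]
      exact List.filter_congr fun x _ => by rw [Bool.and_comm]

-- ===== VERDICT (by name: the statement is the Claim_ definition above) =====
theorem apply_client_filter_py_spec : Claim_equal_apply_client_filter_py := by
  intro data filters _
  unfold Spec_apply_client_filter_py apply_client_filter_py apply_client_filter_py_alt
  by_cases h : filters.isEmpty
  · simp [h]
  · simp only [h, Bool.false_eq_true, if_false]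
    exact pvFold_eq_filter filters data
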